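-- pv_equiv track=rewrite | github.com/rbxo0128/code | 백준/Gold/7569. 토마토/토마토.py | BFS
-- ===== SOURCE A (Python) =====
-- from collections import deque
--
-- def BFS(graph, n, m ,h):
--     visited = [[[False]*m for _ in range(n)] for _ in range(h)]
--     stack = deque()
--     directions = [(0,0,1),(0,0,-1),(1,0,0),(-1,0,0),(0,1,0),(0,-1,0)]
--     cnt = 0
--     for k in range(h):
--         for i in range(n):
--             for j in range(m):
--                 if graph[k][i][j] == 1:
--                     stack.append((i,j,k,0))
--
--     while stack:
--         x,y,z,cnt = stack.popleft()
--         for dx,dy,dz in directions: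
--             sx,sy,sz = x+dx,y+dy,z+dz
--             if 0<=sx<n and 0<=sy<m and 0<=sz<h and not visited[sz][sx][sy]:
--                 if graph[sz][sx][sy] == 0:
--                     visited[sz][sx][sy] = True
--                     graph[sz][sx][sy] = 1
--                     stack.append((sx,sy,sz,cnt+1))
--
--     return cnt
-- ===== SOURCE B (Python) =====
-- def BFS(graph, n, m, h):
--     # Level-order flood: the set of still-unripe cells is the only "visited" structure;
--     # bounds checks disappear because only in-bounds 0-cells ever enter `zeros`.
--     # Return-value equivalence only: unlike A, this implementation does not mutate `graph`.
--     zeros = set()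
--     frontier = []
--     for z in range(h):
--         for x in range(n):
--             for y in range(m):
--                 v = graph[z][x][y]
--                 if v == 1:
--                     frontier.append((x, y, z))
--                 elif v == 0:
--                     zeros.add((x, y, z))
--     ans = 0
--     while frontier:
--         nxt = []
--         for (x, y, z) in frontier:
--             for c in ((x, y, z + 1), (x, y, z - 1), (x + 1, y, z), (x - 1, y, z), (x, y + 1, z), (x, y - 1, z)):
--                 if c in zeros:
--                     zeros.remove(c)
--                     nxt.append(c)
--         if nxt:
--             ans += 1
--         frontier = nxt
--     return ans
-- ===== Notes on version B (the rewrite author's own statement) =====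
-- stated objective: simpler
-- what changed: Queue-of-(cell,dist)-tuples BFS with a 3D visited array and explicit bounds checks is replaced by level-order BFS: a set of unripe cells plus a frontier list, distance tracked by a per-level counter, bounds checks and the visited array eliminated (membership in the unripe set is the only test); return value only - B does not reproduce A's in-place mutation of graph.
import Mathlib
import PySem

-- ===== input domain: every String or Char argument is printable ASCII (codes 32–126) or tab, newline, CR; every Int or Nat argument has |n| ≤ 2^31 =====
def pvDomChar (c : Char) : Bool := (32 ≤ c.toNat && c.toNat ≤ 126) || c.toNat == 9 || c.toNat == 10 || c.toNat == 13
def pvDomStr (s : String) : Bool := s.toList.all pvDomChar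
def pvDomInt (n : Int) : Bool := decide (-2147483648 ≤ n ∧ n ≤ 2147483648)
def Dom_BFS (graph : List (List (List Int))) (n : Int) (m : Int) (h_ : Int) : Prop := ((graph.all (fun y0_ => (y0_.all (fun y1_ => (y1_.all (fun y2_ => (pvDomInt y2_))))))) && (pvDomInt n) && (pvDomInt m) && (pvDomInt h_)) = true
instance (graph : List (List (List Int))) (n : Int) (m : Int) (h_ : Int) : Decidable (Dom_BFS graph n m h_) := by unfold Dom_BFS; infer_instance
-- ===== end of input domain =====

-- B replaces A's tuple-queue BFS (visited array, per-tuple distances, bounds checks) by a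
-- level-order flood over a set of unripe cells; return value only — B does not reproduce A's
-- in-place mutation of `graph`.

-- ===== PORT A =====
abbrev PvCell := Int × Int × Int

-- graph[z][x][y]; every read A performs is at a nonnegative in-range index under Pre_, where
-- pyGetD with a default is exact
def pvG3 (g : List (List (List Int))) (z x y : Int) : Int :=
  PySem.List.pyGetD (PySem.List.pyGetD (PySem.List.pyGetD g z []) x []) y 0

def pvV3 (v : List (List (List Bool))) (z x y : Int) : Bool :=
  PySem.List.pyGetD (PySem.List.pyGetD (PySem.List.pyGetD v z []) x []) y false

-- visited[z][x][y] = b (all written indices are nonnegative and in range: pySetD is exact)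
def pvVSet (v : List (List (List Bool))) (z x y : Int) (b : Bool) : List (List (List Bool)) :=
  PySem.List.pySetD v z (PySem.List.pySetD (PySem.List.pyGetD v z []) x
    (PySem.List.pySetD (PySem.List.pyGetD (PySem.List.pyGetD v z []) x []) y b))

def pvGSet (g : List (List (List Int))) (z x y : Int) (a : Int) : List (List (List Int)) :=
  PySem.List.pySetD g z (PySem.List.pySetD (PySem.List.pyGetD g z []) x
    (PySem.List.pySetD (PySem.List.pyGetD (PySem.List.pyGetD g z []) x []) y a))

def pvDirs : List (Int × Int × Int) := [(0,0,1),(0,0,-1),(1,0,0),(-1,0,0),(0,1,0),(0,-1,0)]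

-- body of A's 'for dx,dy,dz in directions' loop; state = (visited, graph, appended queue items)
def pvAStep (n m h_ x y z c : Int)
    (st : List (List (List Bool)) × List (List (List Int)) × List (Int × Int × Int × Int))
    (d : Int × Int × Int) :
    List (List (List Bool)) × List (List (List Int)) × List (Int × Int × Int × Int) :=
  let sx := x + d.1
  let sy := y + d.2.1
  let sz := z + d.2.2
  if 0 ≤ sx ∧ sx < n ∧ 0 ≤ sy ∧ sy < m ∧ 0 ≤ sz ∧ sz < h_ ∧ pvV3 st.1 sz sx sy = false then
    if pvG3 st.2.1 sz sx sy = 0 then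
      (pvVSet st.1 sz sx sy true, pvGSet st.2.1 sz sx sy 1, st.2.2 ++ [(sx, sy, sz, c + 1)])
    else st
  else st

-- A's 'while stack' loop; the fuel argument only makes the recursion total (BFS supplies more
-- fuel than the loop can ever consume: every push marks one more cell visited)
def pvALoop (n m h_ : Int) : Nat → List (List (List Bool)) → List (List (List Int)) →
    List (Int × Int × Int × Int) → Int → Int
  | 0, _, _, _, cnt => cnt
  | fuel + 1, v, g, q, cnt =>
    match q with
    | [] => cnt
    | (x, y, z, c) :: q' =>
      let st := pvDirs.foldl (pvAStep n m h_ x y z c) (v, g, [])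
      pvALoop n m h_ fuel st.1 st.2.1 (q' ++ st.2.2) c

def BFS (graph : List (List (List Int))) (n : Int) (m : Int) (h_ : Int) : Int :=
  let visited := List.replicate h_.toNat (List.replicate n.toNat (List.replicate m.toNat false))
  let q0 := (PySem.List.pyRange 0 h_ 1).foldl (fun acc k =>
      (PySem.List.pyRange 0 n 1).foldl (fun acc i =>
        (PySem.List.pyRange 0 m 1).foldl (fun acc j =>
          if pvG3 graph k i j = 1 then acc ++ [(i, j, k, (0 : Int))] else acc) acc) acc) []
  pvALoop n m h_ (q0.length + h_.toNat * n.toNat * m.toNat + 1) visited graph q0 0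

-- ===== PORT B =====
-- the six neighbours of a cell, in the order Source B lists them
def pvNbrs (p : PvCell) : List PvCell :=
  [(p.1, p.2.1, p.2.2 + 1), (p.1, p.2.1, p.2.2 - 1), (p.1 + 1, p.2.1, p.2.2),
   (p.1 - 1, p.2.1, p.2.2), (p.1, p.2.1 + 1, p.2.2), (p.1, p.2.1 - 1, p.2.2)]

-- 'if c in zeros: zeros.remove(c); nxt.append(c)' (remove on a present element = discard)
def pvBCell (st : PySem.Set PvCell × List PvCell) (c : PvCell) : PySem.Set PvCell × List PvCell :=
  if c ∈ st.1 then (PySem.Set.discard st.1 c, st.2 ++ [c]) else st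

-- one frontier cell: scan its six neighbours
def pvBFront (st : PySem.Set PvCell × List PvCell) (p : PvCell) : PySem.Set PvCell × List PvCell :=
  (pvNbrs p).foldl pvBCell st

-- each cell appended to nxt was removed from zeros (cited by pvBLoop's decreasing_by)
theorem pvBCell_len (cs : List PvCell) :
    ∀ st : PySem.Set PvCell × List PvCell,
      ((cs.foldl pvBCell st).1.length + (cs.foldl pvBCell st).2.length) ≤
        st.1.length + st.2.length := by
  induction cs with
  | nil => intro st; simp
  | cons c cs ih =>
    intro st
    simp only [List.foldl_cons]
    refine le_trans (ih _) ?_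
    by_cases hc : c ∈ st.1
    · simp only [pvBCell, if_pos hc, PySem.Set.discard, List.length_append, List.length_cons]
      have : (st.1.filter (fun y => !y == c)).length < st.1.length := by
        rw [List.length_filter_lt_length_iff_exists]
        exact ⟨c, hc, by simp⟩
      simp only [List.length_nil]
      omega
    · simp [pvBCell, if_neg hc]

theorem pvBFront_len (F : List PvCell) :
    ∀ st : PySem.Set PvCell × List PvCell,
      ((F.foldl pvBFront st).1.length + (F.foldl pvBFront st).2.length) ≤
        st.1.length + st.2.length := by
  induction F with
  | nil => intro st; simp
  | cons p F ih =>
    intro st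
    simp only [List.foldl_cons]
    exact le_trans (ih _) (pvBCell_len _ _)

-- B's 'while frontier' loop: one level per iteration
def pvBLoop (zeros : PySem.Set PvCell) (frontier : List PvCell) (ans : Int) : Int :=
  if frontier = [] then ans
  else
    if h2 : (frontier.foldl pvBFront (zeros, ([] : List PvCell))).2 = [] then ans
    else pvBLoop (frontier.foldl pvBFront (zeros, ([] : List PvCell))).1
      (frontier.foldl pvBFront (zeros, ([] : List PvCell))).2 (ans + 1)
termination_by zeros.length
decreasing_by
  have h := pvBFront_len frontier (zeros, ([] : List PvCell))
  have h1 : (frontier.foldl pvBFront (zeros, ([] : List PvCell))).2.length ≥ 1 := by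
    cases hs : (frontier.foldl pvBFront (zeros, ([] : List PvCell))).2 with
    | nil => exact absurd hs h2
    | cons a l => simp
  simp only [List.length_nil, Nat.add_zero] at h
  simp only [List.foldl_attach]
  omega

def BFS_alt (graph : List (List (List Int))) (n : Int) (m : Int) (h_ : Int) : Int :=
  let init := (PySem.List.pyRange 0 h_ 1).foldl (fun st z =>
      (PySem.List.pyRange 0 n 1).foldl (fun st x =>
        (PySem.List.pyRange 0 m 1).foldl (fun st y =>
          let v := pvG3 graph z x y
          if v = 1 then (st.1, st.2 ++ [((x, y, z) : PvCell)])
          else if v = 0 then (PySem.Set.add st.1 (x, y, z), st.2)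
          else st) st) st) ((PySem.Set.empty : PySem.Set PvCell), ([] : List PvCell))
  pvBLoop init.1 init.2 0

-- ===== PRECONDITION & SPEC =====
-- Pre_ excludes exactly the inputs on which A raises IndexError (positive n, m, h with graph
-- physically smaller than h×n×m); B raises there too (it reads the same cells).
def Pre_BFS (graph : List (List (List Int))) (n : Int) (m : Int) (h_ : Int) : Prop :=
  0 < n → 0 < m → 0 < h_ →
    (h_.toNat ≤ graph.length ∧ ∀ L ∈ graph.take h_.toNat,
      n.toNat ≤ L.length ∧ ∀ r ∈ L.take n.toNat, m.toNat ≤ r.length)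
instance (graph : List (List (List Int))) (n : Int) (m : Int) (h_ : Int) : Decidable (Pre_BFS graph n m h_) := by unfold Pre_BFS; infer_instance

def pvWitness_BFS : List (List (List Int)) × Int × Int × Int := ([[[1, 0]]], 1, 2, 1)

def Spec_BFS (graph : List (List (List Int))) (n : Int) (m : Int) (h_ : Int) (out : Int) : Prop := out = BFS_alt graph n m h_
instance (graph : List (List (List Int))) (n : Int) (m : Int) (h_ : Int) (out : Int) : Decidable (Spec_BFS graph n m h_ out) := by unfold Spec_BFS; infer_instance

-- ===== CLAIM (what is proved, stated in full; the proofs are below) =====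
def Claim_equal_BFS : Prop := ∀ (graph : List (List (List Int))) (n : Int) (m : Int) (h_ : Int), Dom_BFS graph n m h_ → Pre_BFS graph n m h_ → Spec_BFS graph n m h_ (BFS graph n m h_)

-- ===== LEMMAS AND PROOFS =====

def pvTag (w : Int) (t : PvCell) : Int × Int × Int × Int := (t.1, t.2.1, t.2.2, w)

def pvInb (n m h_ : Int) (t : PvCell) : Prop :=
  0 ≤ t.1 ∧ t.1 < n ∧ 0 ≤ t.2.1 ∧ t.2.1 < m ∧ 0 ≤ t.2.2 ∧ t.2.2 < h_

def pvVD (n m h_ : Int) (v : List (List (List Bool))) : Prop :=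
  v.length = h_.toNat ∧ ∀ L ∈ v, L.length = n.toNat ∧ ∀ r ∈ L, r.length = m.toNat

def pvInv (n m h_ : Int) (v : List (List (List Bool))) (g : List (List (List Int)))
    (Z : List PvCell) : Prop :=
  pvVD n m h_ v ∧ Z.Nodup ∧
    ∀ t : PvCell, t ∈ Z ↔ (pvInb n m h_ t ∧ pvV3 v t.2.2 t.1 t.2.1 = false ∧
      pvG3 g t.2.2 t.1 t.2.1 = 0)

-- the level machine: number of further levels a queue-BFS will open
def pvM (Z : List PvCell) (F P : List PvCell) : Int :=
  match F with
  | f :: F' => pvM (pvBFront (Z, P) f).1 F' (pvBFront (Z, P) f).2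
  | [] => if P = [] then 0 else 1 + pvM Z P []
termination_by (Z.length + F.length + P.length, if F = [] then 1 else 0)
decreasing_by
  · have h := pvBCell_len (pvNbrs f) (Z, P)
    apply Prod.Lex.left
    simp only [List.length_cons, pvBFront] at *
    omega
  · apply Prod.Lex.right'
    · simp only [List.length_nil]; omega
    · have hP : P ≠ [] := by assumption
      simp [hP]

-- A's cell-level step, after substituting the neighbour for the direction
def pvACell (n m h_ c : Int)
    (st : List (List (List Bool)) × List (List (List Int)) × List (Int × Int × Int × Int))
    (s : PvCell) :
    List (List (List Bool)) × List (List (List Int)) × List (Int × Int × Int × Int) :=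
  if 0 ≤ s.1 ∧ s.1 < n ∧ 0 ≤ s.2.1 ∧ s.2.1 < m ∧ 0 ≤ s.2.2 ∧ s.2.2 < h_ ∧
      pvV3 st.1 s.2.2 s.1 s.2.1 = false then
    if pvG3 st.2.1 s.2.2 s.1 s.2.1 = 0 then
      (pvVSet st.1 s.2.2 s.1 s.2.1 true, pvGSet st.2.1 s.2.2 s.1 s.2.1 1,
        st.2.2 ++ [(s.1, s.2.1, s.2.2, c + 1)])
    else st
  else st

theorem pvNbrs_eq (x y z : Int) :
    pvNbrs (x, y, z) = pvDirs.map (fun d => (x + d.1, y + d.2.1, z + d.2.2)) := by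
  simp [pvNbrs, pvDirs, sub_eq_add_neg]

theorem pvDirs_fold_eq (n m h_ x y z c : Int) (st) :
    pvDirs.foldl (pvAStep n m h_ x y z c) st =
      (pvNbrs (x, y, z)).foldl (pvACell n m h_ c) st := by
  rw [pvNbrs_eq, List.foldl_map]
  apply PySem.List.foldl_congr_mem
  intro acc d _
  rfl

-- getD/set helper lemmas
theorem pv_getD_set_self {α : Type} (l : List α) (i : Nat) (a d : α) (h : i < l.length) :
    (l.set i a).getD i d = a := by
  rw [List.getD_eq_getElem?_getD, List.getElem?_set_self h]
  rfl

theorem pv_getD_set_ne {α : Type} (l : List α) (i j : Nat) (a d : α) (h : i ≠ j) :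
    (l.set i a).getD j d = l.getD j d := by
  rw [List.getD_eq_getElem?_getD, List.getElem?_set_ne h, ← List.getD_eq_getElem?_getD]

theorem pv_getD_oob {α : Type} (l : List α) (i : Nat) (d : α) (h : l.length ≤ i) :
    l.getD i d = d := by
  rw [List.getD_eq_getElem?_getD, List.getElem?_eq_none h]
  rfl

-- generic 3D get / set over Nat indices
def pv3get {α : Type} (g : List (List (List α))) (zn xn yn : Nat) (d : α) : α :=
  ((g.getD zn []).getD xn []).getD yn d

def pv3set {α : Type} (g : List (List (List α))) (zn xn yn : Nat) (a : α) :
    List (List (List α)) :=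
  g.set zn ((g.getD zn []).set xn (((g.getD zn []).getD xn []).set yn a))

theorem pv3get_set_self {α : Type} (g : List (List (List α))) (zn xn yn : Nat) (a d : α)
    (h1 : zn < g.length) (h2 : xn < (g.getD zn []).length)
    (h3 : yn < ((g.getD zn []).getD xn []).length) :
    pv3get (pv3set g zn xn yn a) zn xn yn d = a := by
  unfold pv3get pv3set
  rw [pv_getD_set_self _ _ _ _ h1, pv_getD_set_self _ _ _ _ (by simpa using h2),
    pv_getD_set_self _ _ _ _ (by simpa using h3)]

theorem pv3get_set_ne {α : Type} (g : List (List (List α))) (zn xn yn z' x' y' : Nat) (a d : α)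
    (hne : ¬(z' = zn ∧ x' = xn ∧ y' = yn)) :
    pv3get (pv3set g zn xn yn a) z' x' y' d = pv3get g z' x' y' d := by
  unfold pv3get pv3set
  by_cases hz : z' = zn
  · subst hz
    by_cases hzr : z' < g.length
    · rw [pv_getD_set_self _ _ _ _ hzr]
      by_cases hx : x' = xn
      · subst hx
        by_cases hxr : x' < (g.getD z' []).length
        · rw [pv_getD_set_self _ _ _ _ hxr]
          have hy : ¬ y' = yn := by tauto
          rw [pv_getD_set_ne _ _ _ _ _ (fun h => hy h.symm)]
        · have hlen : ((g.getD z' []).set x' (((g.getD z' []).getD x' []).set yn a)).length ≤ x' := by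
            rw [List.length_set]; omega
          rw [pv_getD_oob _ _ _ hlen, pv_getD_oob (g.getD z' []) _ _ (by omega)]
      · rw [pv_getD_set_ne _ _ _ _ _ (fun h => hx h.symm)]
    · have hlen : (g.set z' ((g.getD z' []).set xn (((g.getD z' []).getD xn []).set yn a))).length ≤ z' := by
        rw [List.length_set]; omega
      rw [pv_getD_oob _ _ _ hlen, pv_getD_oob g _ _ (by omega)]
  · rw [pv_getD_set_ne _ _ _ _ _ (fun h => hz h.symm)]

theorem pvV3_eq (v : List (List (List Bool))) {z x y : Int}
    (hz : 0 ≤ z) (hx : 0 ≤ x) (hy : 0 ≤ y) :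
    pvV3 v z x y = pv3get v z.toNat x.toNat y.toNat false := by
  simp [pvV3, pv3get, PySem.List.pyGetD_of_nonneg, hz, hx, hy]

theorem pvG3_eq (g : List (List (List Int))) {z x y : Int}
    (hz : 0 ≤ z) (hx : 0 ≤ x) (hy : 0 ≤ y) :
    pvG3 g z x y = pv3get g z.toNat x.toNat y.toNat 0 := by
  simp [pvG3, pv3get, PySem.List.pyGetD_of_nonneg, hz, hx, hy]

theorem pvVSet_eq (v : List (List (List Bool))) {z x y : Int} (b : Bool)
    (hz : 0 ≤ z) (hx : 0 ≤ x) (hy : 0 ≤ y) :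
    pvVSet v z x y b = pv3set v z.toNat x.toNat y.toNat b := by
  simp [pvVSet, pv3set, PySem.List.pySetD_of_nonneg, PySem.List.pyGetD_of_nonneg, hz, hx, hy]

theorem pvGSet_eq (g : List (List (List Int))) {z x y : Int} (a : Int)
    (hz : 0 ≤ z) (hx : 0 ≤ x) (hy : 0 ≤ y) :
    pvGSet g z x y a = pv3set g z.toNat x.toNat y.toNat a := by
  simp [pvGSet, pv3set, PySem.List.pySetD_of_nonneg, PySem.List.pyGetD_of_nonneg, hz, hx, hy]

theorem pvVD_set (n m h_ : Int) (v : List (List (List Bool))) (zn xn yn : Nat) (b : Bool)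
    (hVD : pvVD n m h_ v) (h1 : zn < v.length) (h2 : xn < (v.getD zn []).length) :
    pvVD n m h_ (pv3set v zn xn yn b) := by
  obtain ⟨hl, hm⟩ := hVD
  have hlayer : v.getD zn [] ∈ v := by
    rw [List.getD_eq_getElem (l := v) _ h1]; exact List.getElem_mem h1
  have hrow : (v.getD zn []).getD xn [] ∈ v.getD zn [] := by
    rw [List.getD_eq_getElem (l := v.getD zn []) _ h2]; exact List.getElem_mem h2
  constructor
  · rw [pv3set, List.length_set]; exact hl
  · intro L hL
    rcases List.mem_or_eq_of_mem_set hL with hL | rfl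
    · exact hm L hL
    · constructor
      · rw [List.length_set]; exact (hm _ hlayer).1
      · intro r hr
        rcases List.mem_or_eq_of_mem_set hr with hr | rfl
        · exact (hm _ hlayer).2 r hr
        · rw [List.length_set]; exact (hm _ hlayer).2 _ hrow

-- two in-bounds cells with equal toNat-coordinates are equal
theorem pv_cell_toNat_inj (n m h_ : Int) {s t : PvCell}
    (hs : pvInb n m h_ s) (ht : pvInb n m h_ t)
    (h : t.2.2.toNat = s.2.2.toNat ∧ t.1.toNat = s.1.toNat ∧ t.2.1.toNat = s.2.1.toNat) :
    t = s := by
  obtain ⟨hs1, _, hs3, _, hs5, _⟩ := hs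
  obtain ⟨ht1, _, ht3, _, ht5, _⟩ := ht
  obtain ⟨t1, t2, t3⟩ := t
  obtain ⟨s1, s2, s3⟩ := s
  simp only [Prod.mk.injEq]
  simp only at *
  omega

-- flooding a cell of Z preserves the simulation invariant, with Z := Z.discard s
theorem pvInv_flood (n m h_ : Int) (v : List (List (List Bool))) (g : List (List (List Int)))
    (Z : PySem.Set PvCell) (s : PvCell) (hInv : pvInv n m h_ v g Z) (hs : s ∈ Z) :
    pvInv n m h_ (pvVSet v s.2.2 s.1 s.2.1 true) (pvGSet g s.2.2 s.1 s.2.1 1)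
      (PySem.Set.discard Z s) := by
  obtain ⟨hVD, hNd, hchar⟩ := hInv
  have hsP := (hchar s).mp hs
  obtain ⟨hinb, hv3, hg3⟩ := hsP
  obtain ⟨hx0, hxn, hy0, hym, hz0, hzh⟩ := hinb
  -- in-range facts for the visited array
  have hzr : s.2.2.toNat < v.length := by rw [hVD.1]; omega
  have hlayer : v.getD s.2.2.toNat [] ∈ v := by
    rw [List.getD_eq_getElem (l := v) _ hzr]; exact List.getElem_mem hzr
  have hxr : s.1.toNat < (v.getD s.2.2.toNat []).length := by
    rw [(hVD.2 _ hlayer).1]; omega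
  have hrowm : (v.getD s.2.2.toNat []).getD s.1.toNat [] ∈ v.getD s.2.2.toNat [] := by
    rw [List.getD_eq_getElem (l := v.getD s.2.2.toNat []) _ hxr]; exact List.getElem_mem hxr
  have hyr : s.2.1.toNat < ((v.getD s.2.2.toNat []).getD s.1.toNat []).length := by
    rw [(hVD.2 _ hlayer).2 _ hrowm]; omega
  rw [pvVSet_eq v true hz0 hx0 hy0, pvGSet_eq g 1 hz0 hx0 hy0]
  refine ⟨pvVD_set n m h_ v _ _ _ _ hVD hzr hxr,
    PySem.Set.nodup_discard _ _ hNd, ?_⟩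
  intro t
  rw [PySem.Set.mem_discard]
  by_cases hts : t = s
  · subst hts
    constructor
    · intro ⟨_, hne⟩; exact absurd rfl hne
    · intro ⟨hinb', hv3', _⟩
      rw [pvV3_eq _ hz0 hx0 hy0, pv3get_set_self _ _ _ _ _ _ hzr hxr hyr] at hv3'
      exact absurd hv3' (by simp)
  · by_cases hinbT : pvInb n m h_ t
    · obtain ⟨htx0, _, hty0, _, htz0, _⟩ := id hinbT
      have hne : ¬(t.2.2.toNat = s.2.2.toNat ∧ t.1.toNat = s.1.toNat ∧
          t.2.1.toNat = s.2.1.toNat) := by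
        intro hc
        exact hts (pv_cell_toNat_inj n m h_ ⟨hx0, hxn, hy0, hym, hz0, hzh⟩ hinbT hc)
      rw [pvV3_eq _ htz0 htx0 hty0, pvG3_eq _ htz0 htx0 hty0,
        pv3get_set_ne _ _ _ _ _ _ _ _ _ hne, pv3get_set_ne _ _ _ _ _ _ _ _ _ hne,
        ← pvV3_eq v htz0 htx0 hty0, ← pvG3_eq g htz0 htx0 hty0]
      rw [hchar t]
      simp [hts]
    · constructor
      · intro ⟨htZ, _⟩
        exact absurd ((hchar t).mp htZ).1 hinbT
      · intro ⟨hinb', _⟩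
        exact absurd hinb' hinbT

-- A's direction scan and B's neighbour scan simulate each other cell by cell
theorem pvFold_corr (n m h_ c : Int) (cs : List PvCell) :
    ∀ (v : List (List (List Bool))) (g : List (List (List Int))) (Z : PySem.Set PvCell)
      (accB : List PvCell), pvInv n m h_ v g Z →
      ((cs.foldl (pvACell n m h_ c) (v, g, accB.map (pvTag (c + 1)))).2.2 =
          ((cs.foldl pvBCell (Z, accB)).2).map (pvTag (c + 1))) ∧
        pvInv n m h_ (cs.foldl (pvACell n m h_ c) (v, g, accB.map (pvTag (c + 1)))).1
          (cs.foldl (pvACell n m h_ c) (v, g, accB.map (pvTag (c + 1)))).2.1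
          (cs.foldl pvBCell (Z, accB)).1 := by
  induction cs with
  | nil => intro v g Z accB hInv; exact ⟨rfl, hInv⟩
  | cons s cs ih =>
    intro v g Z accB hInv
    obtain ⟨hVD, hNd, hchar⟩ := id hInv
    simp only [List.foldl_cons]
    by_cases hs : s ∈ Z
    · obtain ⟨hinb, hv3, hg3⟩ := (hchar s).mp hs
      obtain ⟨hx0, hxn, hy0, hym, hz0, hzh⟩ := id hinb
      have hA : pvACell n m h_ c (v, g, accB.map (pvTag (c + 1))) s =
          (pvVSet v s.2.2 s.1 s.2.1 true, pvGSet g s.2.2 s.1 s.2.1 1,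
            (accB ++ [s]).map (pvTag (c + 1))) := by
        simp only [pvACell]
        rw [if_pos ⟨hx0, hxn, hy0, hym, hz0, hzh, hv3⟩, if_pos hg3]
        simp [pvTag]
      have hB : pvBCell (Z, accB) s = (PySem.Set.discard Z s, accB ++ [s]) := by
        simp [pvBCell, hs]
      rw [hA, hB]
      exact ih _ _ _ _ (pvInv_flood n m h_ v g Z s hInv hs)
    · have hA : pvACell n m h_ c (v, g, accB.map (pvTag (c + 1))) s =
          (v, g, accB.map (pvTag (c + 1))) := by
        simp only [pvACell]
        split
        · rename_i hcond
          rw [if_neg]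
          intro hg0
          exact hs ((hchar s).mpr ⟨⟨hcond.1, hcond.2.1, hcond.2.2.1, hcond.2.2.2.1,
            hcond.2.2.2.2.1, hcond.2.2.2.2.2.1⟩, hcond.2.2.2.2.2.2, hg0⟩)
        · rfl
      have hB : pvBCell (Z, accB) s = (Z, accB) := by simp [pvBCell, hs]
      rw [hA, hB]
      exact ih _ _ _ _ hInv

-- the nxt accumulator only collects appends: it can be split off
theorem pvBCell_shift (cs : List PvCell) :
    ∀ (Z : PySem.Set PvCell) (P : List PvCell),
      (cs.foldl pvBCell (Z, P)).1 = (cs.foldl pvBCell (Z, ([] : List PvCell))).1 ∧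
      (cs.foldl pvBCell (Z, P)).2 = P ++ (cs.foldl pvBCell (Z, ([] : List PvCell))).2 := by
  induction cs with
  | nil => intro Z P; simp
  | cons c cs ih =>
    intro Z P
    simp only [List.foldl_cons]
    by_cases hc : c ∈ Z
    · have h1 : pvBCell (Z, P) c = (PySem.Set.discard Z c, P ++ [c]) := by simp [pvBCell, hc]
      have h2 : pvBCell (Z, ([] : List PvCell)) c = (PySem.Set.discard Z c, [c]) := by
        simp [pvBCell, hc]
      rw [h1, h2]
      obtain ⟨ihP1, ihP2⟩ := ih (PySem.Set.discard Z c) (P ++ [c])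
      obtain ⟨ihc1, ihc2⟩ := ih (PySem.Set.discard Z c) [c]
      refine ⟨ihP1.trans ihc1.symm, ?_⟩
      rw [ihP2, ihc2, List.append_assoc]
    · have h1 : pvBCell (Z, P) c = (Z, P) := by simp [pvBCell, hc]
      have h2 : pvBCell (Z, ([] : List PvCell)) c = (Z, ([] : List PvCell)) := by
        simp [pvBCell, hc]
      rw [h1, h2]
      exact ih Z P

-- the queue lemma: A's tuple-queue loop computes d + (number of further levels)
theorem pvALoop_eq (n m h_ : Int) :
    ∀ (fuel : Nat) (v : List (List (List Bool))) (g : List (List (List Int)))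
      (Z : PySem.Set PvCell) (F P : List PvCell) (d c : Int),
      pvInv n m h_ v g Z → F.length + P.length + Z.length ≤ fuel →
      pvALoop n m h_ fuel v g (F.map (pvTag d) ++ P.map (pvTag (d + 1))) c =
        if F = [] ∧ P = [] then c else d + pvM Z F P := by
  intro fuel
  induction fuel with
  | zero =>
    intro v g Z F P d c hInv hle
    have hF : F = [] := List.length_eq_zero_iff.mp (by omega)
    have hP : P = [] := List.length_eq_zero_iff.mp (by omega)
    subst hF; subst hP
    simp [pvALoop]
  | succ fuel ih =>
    intro v g Z F P d c hInv hle
    match F, P with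
    | [], [] => simp [pvALoop]
    | f :: F', P =>
      have hcons : (f :: F').map (pvTag d) ++ P.map (pvTag (d + 1)) =
          (f.1, f.2.1, f.2.2, d) :: (F'.map (pvTag d) ++ P.map (pvTag (d + 1))) := rfl
      rw [hcons]
      simp only [pvALoop]
      rw [pvDirs_fold_eq]
      have hcell : ((f.1, f.2.1, f.2.2) : PvCell) = f := rfl
      rw [hcell]
      obtain ⟨hacc, hInv'⟩ := pvFold_corr n m h_ d (pvNbrs f) v g Z [] hInv
      simp only [List.map_nil] at hacc hInv'
      rw [hacc]
      rw [List.append_assoc, ← List.map_append]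
      have hlen := pvBCell_len (pvNbrs f) (Z, ([] : List PvCell))
      simp only [List.length_nil, Nat.add_zero] at hlen
      have hle' : F'.length + (P ++ ((pvNbrs f).foldl pvBCell (Z, ([] : List PvCell))).2).length
          + ((pvNbrs f).foldl pvBCell (Z, ([] : List PvCell))).1.length ≤ fuel := by
        simp only [List.length_append, List.length_cons] at hle ⊢
        omega
      rw [ih _ _ _ _ _ d d hInv' hle']
      have hMstep : pvM Z (f :: F') P =
          pvM (pvBFront (Z, P) f).1 F' (pvBFront (Z, P) f).2 := by rw [pvM]
      obtain ⟨hs1, hs2⟩ := pvBCell_shift (pvNbrs f) Z P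
      have hbf1 : (pvBFront (Z, P) f).1 = ((pvNbrs f).foldl pvBCell (Z, ([] : List PvCell))).1 :=
        hs1
      have hbf2 : (pvBFront (Z, P) f).2 =
          P ++ ((pvNbrs f).foldl pvBCell (Z, ([] : List PvCell))).2 := hs2
      rw [hMstep, hbf1, hbf2]
      have hFne : ¬(f :: F' = [] ∧ P = []) := by simp
      rw [if_neg hFne]
      by_cases hE : F' = [] ∧ P ++ ((pvNbrs f).foldl pvBCell (Z, ([] : List PvCell))).2 = []
      · rw [if_pos hE, hE.1, hE.2]
        have : pvM ((pvNbrs f).foldl pvBCell (Z, ([] : List PvCell))).1 [] [] = 0 := by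
          rw [pvM]; simp
        rw [this]
        omega
      · rw [if_neg hE]
    | [], p :: P' =>
      have hcons : ([] : List PvCell).map (pvTag d) ++ (p :: P').map (pvTag (d + 1)) =
          (p.1, p.2.1, p.2.2, d + 1) :: (P'.map (pvTag (d + 1)) ++
            ([] : List PvCell).map (pvTag (d + 1 + 1))) := by simp [pvTag]
      rw [hcons]
      simp only [pvALoop]
      rw [pvDirs_fold_eq]
      have hcell : ((p.1, p.2.1, p.2.2) : PvCell) = p := rfl
      rw [hcell]
      obtain ⟨hacc, hInv'⟩ := pvFold_corr n m h_ (d + 1) (pvNbrs p) v g Z [] hInv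
      simp only [List.map_nil] at hacc hInv'
      rw [hacc]
      have hlen := pvBCell_len (pvNbrs p) (Z, ([] : List PvCell))
      simp only [List.length_nil, Nat.add_zero] at hlen
      have hle' : P'.length + ((pvNbrs p).foldl pvBCell (Z, ([] : List PvCell))).2.length
          + ((pvNbrs p).foldl pvBCell (Z, ([] : List PvCell))).1.length ≤ fuel := by
        simp only [List.length_cons, List.length_nil] at hle ⊢
        omega
      have happ : P'.map (pvTag (d + 1)) ++ ([] : List PvCell).map (pvTag (d + 1 + 1)) ++
          (((pvNbrs p).foldl pvBCell (Z, ([] : List PvCell))).2).map (pvTag (d + 1 + 1)) =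
          P'.map (pvTag (d + 1)) ++
            (((pvNbrs p).foldl pvBCell (Z, ([] : List PvCell))).2).map (pvTag (d + 1 + 1)) := by
        simp
      rw [happ]
      rw [ih _ _ _ _ _ (d + 1) (d + 1) hInv' hle']
      rw [if_neg (show ¬(True ∧ p :: P' = []) from fun hc => List.cons_ne_nil _ _ hc.2)]
      have hM1 : pvM Z [] (p :: P') = 1 + pvM Z (p :: P') [] := by
        conv_lhs => rw [pvM]
        rw [if_neg (List.cons_ne_nil p P')]
      have hM2 : pvM Z (p :: P') [] =
          pvM (pvBFront (Z, ([] : List PvCell)) p).1 P' (pvBFront (Z, ([] : List PvCell)) p).2 := by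
        rw [pvM]
      rw [hM1, hM2]
      by_cases hE : P' = [] ∧ ((pvNbrs p).foldl pvBCell (Z, ([] : List PvCell))).2 = []
      · rw [if_pos hE]
        have hz : pvM (pvBFront (Z, ([] : List PvCell)) p).1 P'
            (pvBFront (Z, ([] : List PvCell)) p).2 = 0 := by
          show pvM ((pvNbrs p).foldl pvBCell (Z, ([] : List PvCell))).1 P'
            ((pvNbrs p).foldl pvBCell (Z, ([] : List PvCell))).2 = 0
          rw [hE.1, hE.2, pvM]; simp
        rw [hz]
        omega
      · rw [if_neg hE]
        show d + 1 + pvM ((pvNbrs p).foldl pvBCell (Z, ([] : List PvCell))).1 P'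
            ((pvNbrs p).foldl pvBCell (Z, ([] : List PvCell))).2 =
          d + (1 + pvM ((pvNbrs p).foldl pvBCell (Z, ([] : List PvCell))).1 P'
            ((pvNbrs p).foldl pvBCell (Z, ([] : List PvCell))).2)
        omega

theorem pvM_nil (Z : PySem.Set PvCell) : pvM Z [] [] = 0 := by
  conv_lhs => rw [pvM]
  simp

theorem pvM_fold (F : List PvCell) :
    ∀ (Z : PySem.Set PvCell) (P : List PvCell),
      pvM Z F P = if (F.foldl pvBFront (Z, P)).2 = [] then 0
        else 1 + pvM (F.foldl pvBFront (Z, P)).1 (F.foldl pvBFront (Z, P)).2 [] := by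
  induction F with
  | nil =>
    intro Z P
    show pvM Z [] P = if P = [] then 0 else 1 + pvM Z P []
    conv_lhs => rw [pvM]
  | cons f F' ih =>
    intro Z P
    have hstep : pvM Z (f :: F') P = pvM (pvBFront (Z, P) f).1 F' (pvBFront (Z, P) f).2 := by
      rw [pvM]
    rw [hstep, ih]
    simp only [List.foldl_cons]

-- B's level loop counts the levels of the machine
theorem pvBLoop_eq_aux (N : Nat) :
    ∀ (Z : PySem.Set PvCell) (F : List PvCell) (ans : Int), Z.length ≤ N →
      pvBLoop Z F ans = ans + pvM Z F [] := by
  induction N with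
  | zero =>
    intro Z F ans hN
    by_cases hF : F = []
    · subst hF; rw [pvBLoop]; simp [pvM_nil]
    · rw [pvBLoop, if_neg hF]
      have hlen := pvBFront_len F (Z, ([] : List PvCell))
      simp only [List.length_nil, Nat.add_zero] at hlen
      have hst2 : (F.foldl pvBFront (Z, ([] : List PvCell))).2 = [] := by
        refine List.length_eq_zero_iff.mp ?_
        omega
      rw [dif_pos hst2, pvM_fold F Z [], if_pos hst2]
      omega
  | succ N ihN =>
    intro Z F ans hN
    by_cases hF : F = []
    · subst hF; rw [pvBLoop]; simp [pvM_nil]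
    · rw [pvBLoop, if_neg hF]
      by_cases hst2 : (F.foldl pvBFront (Z, ([] : List PvCell))).2 = []
      · rw [dif_pos hst2, pvM_fold F Z [], if_pos hst2]; omega
      · rw [dif_neg hst2]
        have hlen := pvBFront_len F (Z, ([] : List PvCell))
        simp only [List.length_nil, Nat.add_zero] at hlen
        have h2 : (F.foldl pvBFront (Z, ([] : List PvCell))).2.length ≥ 1 := by
          cases h : (F.foldl pvBFront (Z, ([] : List PvCell))).2 with
          | nil => exact absurd h hst2
          | cons a l => simp
        rw [ihN _ _ _ (by omega), pvM_fold F Z [], if_neg hst2]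
        omega

theorem pvBLoop_eq (Z : PySem.Set PvCell) (F : List PvCell) (ans : Int) :
    pvBLoop Z F ans = ans + pvM Z F [] :=
  pvBLoop_eq_aux Z.length Z F ans le_rfl

-- generic fold helpers for the initialisation loops
theorem pv_foldl_pair {γ σ₁ σ₂ : Type} (F : σ₁ × σ₂ → γ → σ₁ × σ₂) (f : σ₁ → γ → σ₁)
    (g : σ₂ → γ → σ₂) (h : ∀ s a, F s a = (f s.1 a, g s.2 a)) :
    ∀ (L : List γ) (s : σ₁ × σ₂), L.foldl F s = (L.foldl f s.1, L.foldl g s.2) := by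
  intro L
  induction L with
  | nil => intro s; rfl
  | cons a L ih =>
    intro s
    simp only [List.foldl_cons, h]
    exact ih _

theorem pv_foldl_mem {γ : Type} (F : List PvCell → γ → List PvCell) (Q : γ → PvCell → Prop)
    (h : ∀ a s t, t ∈ F s a ↔ t ∈ s ∨ Q a t) :
    ∀ (L : List γ) (s : List PvCell) (t : PvCell),
      t ∈ L.foldl F s ↔ t ∈ s ∨ ∃ a ∈ L, Q a t := by
  intro L
  induction L with
  | nil => intro s t; simp
  | cons a L ih =>
    intro s t
    simp only [List.foldl_cons]
    rw [ih, h, List.exists_mem_cons_iff]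
    tauto

theorem pv_foldl_nodup {γ : Type} (F : List PvCell → γ → List PvCell)
    (h : ∀ s a, s.Nodup → (F s a).Nodup) :
    ∀ (L : List γ) (s : List PvCell), s.Nodup → (L.foldl F s).Nodup := by
  intro L
  induction L with
  | nil => intro s hs; exact hs
  | cons a L ih => intro s hs; exact ih _ (h s a hs)

theorem pv_foldl_len {γ α : Type} (F : List α → γ → List α) (k : Nat)
    (h : ∀ s a, (F s a).length ≤ s.length + k) :
    ∀ (L : List γ) (s : List α), (L.foldl F s).length ≤ s.length + L.length * k := by
  intro L
  induction L with
  | nil => intro s; simp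
  | cons a L ih =>
    intro s
    simp only [List.foldl_cons, List.length_cons]
    have h1 := ih (F s a)
    have h2 := h s a
    have : (L.length + 1) * k = L.length * k + k := by ring
    omega

theorem pv_foldl_map_rel {γ α β : Type} (t : α → β) (F : List β → γ → List β)
    (G : List α → γ → List α) (h : ∀ s a, F (s.map t) a = (G s a).map t) :
    ∀ (L : List γ) (s : List α), L.foldl F (s.map t) = (L.foldl G s).map t := by
  intro L
  induction L with
  | nil => intro s; rfl
  | cons a L ih =>
    intro s
    simp only [List.foldl_cons, h]
    exact ih _

-- the two components of B's initialisation loop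
def pvZeros0 (graph : List (List (List Int))) (n m h_ : Int) : PySem.Set PvCell :=
  (PySem.List.pyRange 0 h_ 1).foldl (fun s z =>
    (PySem.List.pyRange 0 n 1).foldl (fun s x =>
      (PySem.List.pyRange 0 m 1).foldl (fun s y =>
        if pvG3 graph z x y = 1 then s
        else if pvG3 graph z x y = 0 then PySem.Set.add s (x, y, z) else s) s) s)
    PySem.Set.empty

def pvFront0 (graph : List (List (List Int))) (n m h_ : Int) : List PvCell :=
  (PySem.List.pyRange 0 h_ 1).foldl (fun l z =>
    (PySem.List.pyRange 0 n 1).foldl (fun l x =>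
      (PySem.List.pyRange 0 m 1).foldl (fun l y =>
        if pvG3 graph z x y = 1 then l ++ [((x, y, z) : PvCell)]
        else if pvG3 graph z x y = 0 then l else l) l) l) []

theorem pvInit_split (graph : List (List (List Int))) (n m h_ : Int) :
    ((PySem.List.pyRange 0 h_ 1).foldl (fun st z =>
      (PySem.List.pyRange 0 n 1).foldl (fun st x =>
        (PySem.List.pyRange 0 m 1).foldl (fun st y =>
          let v := pvG3 graph z x y
          if v = 1 then (st.1, st.2 ++ [((x, y, z) : PvCell)])
          else if v = 0 then (PySem.Set.add st.1 (x, y, z), st.2)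
          else st) st) st) ((PySem.Set.empty : PySem.Set PvCell), ([] : List PvCell))) =
    (pvZeros0 graph n m h_, pvFront0 graph n m h_) := by
  apply pv_foldl_pair
  intro s z
  apply pv_foldl_pair
  intro s x
  apply pv_foldl_pair
  intro s y
  by_cases h1 : pvG3 graph z x y = 1
  · simp [h1]
  · by_cases h0 : pvG3 graph z x y = 0 <;> simp [h1, h0]

theorem pvQ0_eq (graph : List (List (List Int))) (n m h_ : Int) :
    ((PySem.List.pyRange 0 h_ 1).foldl (fun acc k =>
      (PySem.List.pyRange 0 n 1).foldl (fun acc i =>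
        (PySem.List.pyRange 0 m 1).foldl (fun acc j =>
          if pvG3 graph k i j = 1 then acc ++ [(i, j, k, (0 : Int))] else acc) acc) acc)
      ([] : List (Int × Int × Int × Int))) =
    (pvFront0 graph n m h_).map (pvTag 0) := by
  show ((PySem.List.pyRange 0 h_ 1).foldl _ (([] : List PvCell).map (pvTag 0))) = _
  apply pv_foldl_map_rel (pvTag 0)
  intro s z
  show ((PySem.List.pyRange 0 n 1).foldl _ ((s : List PvCell).map (pvTag 0))) = _
  apply pv_foldl_map_rel (pvTag 0)
  intro s x
  show ((PySem.List.pyRange 0 m 1).foldl _ ((s : List PvCell).map (pvTag 0))) = _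
  apply pv_foldl_map_rel (pvTag 0)
  intro s y
  by_cases h1 : pvG3 graph z x y = 1
  · simp [h1, pvTag]
  · by_cases h0 : pvG3 graph z x y = 0 <;> simp [h1, h0]

theorem pvZeros0_mem (graph : List (List (List Int))) (n m h_ : Int) (t : PvCell) :
    t ∈ pvZeros0 graph n m h_ ↔ pvInb n m h_ t ∧ pvG3 graph t.2.2 t.1 t.2.1 = 0 := by
  have hbody : ∀ (z x : Int) (y : Int) (s : List PvCell) (u : PvCell),
      u ∈ (if pvG3 graph z x y = 1 then s
        else if pvG3 graph z x y = 0 then PySem.Set.add s (x, y, z) else s) ↔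
      u ∈ s ∨ (pvG3 graph z x y = 0 ∧ u = (x, y, z)) := by
    intro z x y s u
    by_cases h1 : pvG3 graph z x y = 1
    · have h0 : ¬ pvG3 graph z x y = 0 := by rw [h1]; norm_num
      simp [h1]
    · by_cases h0 : pvG3 graph z x y = 0 <;> simp [h1, h0, PySem.Set.mem_add]
  have hinner : ∀ (z x : Int) (s : List PvCell) (u : PvCell),
      u ∈ ((PySem.List.pyRange 0 m 1).foldl (fun s y =>
        if pvG3 graph z x y = 1 then s
        else if pvG3 graph z x y = 0 then PySem.Set.add s (x, y, z) else s) s) ↔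
      u ∈ s ∨ ∃ y ∈ PySem.List.pyRange 0 m 1, pvG3 graph z x y = 0 ∧ u = (x, y, z) := by
    intro z x s u
    exact pv_foldl_mem _ (fun y u => pvG3 graph z x y = 0 ∧ u = (x, y, z))
      (hbody z x) _ s u
  have hmid : ∀ (z : Int) (s : List PvCell) (u : PvCell),
      u ∈ ((PySem.List.pyRange 0 n 1).foldl (fun s x =>
        (PySem.List.pyRange 0 m 1).foldl (fun s y =>
          if pvG3 graph z x y = 1 then s
          else if pvG3 graph z x y = 0 then PySem.Set.add s (x, y, z) else s) s) s) ↔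
      u ∈ s ∨ ∃ x ∈ PySem.List.pyRange 0 n 1, ∃ y ∈ PySem.List.pyRange 0 m 1,
        pvG3 graph z x y = 0 ∧ u = (x, y, z) := by
    intro z s u
    exact pv_foldl_mem _
      (fun x u => ∃ y ∈ PySem.List.pyRange 0 m 1, pvG3 graph z x y = 0 ∧ u = (x, y, z))
      (fun x s' u' => hinner z x s' u') _ s u
  have houter : ∀ (u : PvCell),
      u ∈ pvZeros0 graph n m h_ ↔
      u ∈ (PySem.Set.empty : PySem.Set PvCell) ∨ ∃ z ∈ PySem.List.pyRange 0 h_ 1,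
        ∃ x ∈ PySem.List.pyRange 0 n 1, ∃ y ∈ PySem.List.pyRange 0 m 1,
          pvG3 graph z x y = 0 ∧ u = (x, y, z) := by
    intro u
    exact pv_foldl_mem _
      (fun z u => ∃ x ∈ PySem.List.pyRange 0 n 1, ∃ y ∈ PySem.List.pyRange 0 m 1,
        pvG3 graph z x y = 0 ∧ u = (x, y, z))
      (fun z s' u' => hmid z s' u') _ _ u
  rw [houter t]
  constructor
  · rintro (hmem | ⟨z, hz, x, hx, y, hy, hv, rfl⟩)
    · simp [PySem.Set.empty] at hmem
    · rw [PySem.List.mem_pyRange_one] at hz hx hy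
      exact ⟨⟨hx.1, hx.2, hy.1, hy.2, hz.1, hz.2⟩, hv⟩
  · rintro ⟨⟨hx0, hxn, hy0, hym, hz0, hzh⟩, hv⟩
    right
    exact ⟨t.2.2, PySem.List.mem_pyRange_one.mpr ⟨hz0, hzh⟩,
      t.1, PySem.List.mem_pyRange_one.mpr ⟨hx0, hxn⟩,
      t.2.1, PySem.List.mem_pyRange_one.mpr ⟨hy0, hym⟩, hv, rfl⟩

theorem pvZeros0_nodup (graph : List (List (List Int))) (n m h_ : Int) :
    (pvZeros0 graph n m h_).Nodup := by
  unfold pvZeros0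
  apply pv_foldl_nodup
  · intro s z hs
    apply pv_foldl_nodup
    · intro s' x hs'
      apply pv_foldl_nodup
      · intro s'' y hs''
        by_cases h1 : pvG3 graph z x y = 1
        · simpa [h1] using hs''
        · by_cases h0 : pvG3 graph z x y = 0
          · simpa [h1, h0] using PySem.Set.nodup_add _ _ hs''
          · simpa [h1, h0] using hs''
      · exact hs'
    · exact hs
  · simp [PySem.Set.empty]

theorem pvZeros0_len (graph : List (List (List Int))) (n m h_ : Int) :
    (pvZeros0 graph n m h_).length ≤ h_.toNat * (n.toNat * m.toNat) := by
  unfold pvZeros0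
  have hadd : ∀ (s : PySem.Set PvCell) (c : PvCell), (PySem.Set.add s c).length ≤ s.length + 1 := by
    intro s c
    rw [PySem.Set.add_eq_ite]
    split <;> simp
  have hinner : ∀ (z x : Int) (s : PySem.Set PvCell),
      ((PySem.List.pyRange 0 m 1).foldl (fun s y =>
        if pvG3 graph z x y = 1 then s
        else if pvG3 graph z x y = 0 then PySem.Set.add s (x, y, z) else s) s).length ≤
        s.length + m.toNat := by
    intro z x s
    have h := pv_foldl_len (fun (s : PySem.Set PvCell) (y : Int) =>
        if pvG3 graph z x y = 1 then s
        else if pvG3 graph z x y = 0 then PySem.Set.add s (x, y, z) else s) 1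
      (fun s' y => by
        by_cases h1 : pvG3 graph z x y = 1
        · simp [h1]
        · by_cases h0 : pvG3 graph z x y = 0 <;> simp [h1, h0, hadd])
      (PySem.List.pyRange 0 m 1) s
    simpa [PySem.List.length_pyRange_one] using h
  have hmid : ∀ (z : Int) (s : PySem.Set PvCell),
      ((PySem.List.pyRange 0 n 1).foldl (fun s x =>
        (PySem.List.pyRange 0 m 1).foldl (fun s y =>
          if pvG3 graph z x y = 1 then s
          else if pvG3 graph z x y = 0 then PySem.Set.add s (x, y, z) else s) s) s).length ≤
        s.length + n.toNat * m.toNat := by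
    intro z s
    have h := pv_foldl_len (fun (s : PySem.Set PvCell) (x : Int) =>
        (PySem.List.pyRange 0 m 1).foldl (fun s y =>
          if pvG3 graph z x y = 1 then s
          else if pvG3 graph z x y = 0 then PySem.Set.add s (x, y, z) else s) s) m.toNat
      (fun s' x => hinner z x s') (PySem.List.pyRange 0 n 1) s
    simpa [PySem.List.length_pyRange_one] using h
  have houter := pv_foldl_len (fun (s : PySem.Set PvCell) (z : Int) =>
      (PySem.List.pyRange 0 n 1).foldl (fun s x =>
        (PySem.List.pyRange 0 m 1).foldl (fun s y =>
          if pvG3 graph z x y = 1 then s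
          else if pvG3 graph z x y = 0 then PySem.Set.add s (x, y, z) else s) s) s)
    (n.toNat * m.toNat) (fun s z => hmid z s) (PySem.List.pyRange 0 h_ 1) PySem.Set.empty
  simpa [PySem.List.length_pyRange_one, PySem.Set.empty] using houter

-- initial visited array: correct dimensions, everywhere false
theorem pvVD0 (n m h_ : Int) :
    pvVD n m h_ (List.replicate h_.toNat (List.replicate n.toNat
      (List.replicate m.toNat false))) := by
  refine ⟨List.length_replicate, ?_⟩
  intro L hL
  rw [List.eq_of_mem_replicate hL]
  refine ⟨List.length_replicate, ?_⟩
  intro r hr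
  rw [List.eq_of_mem_replicate hr]
  exact List.length_replicate

theorem pvV30 (n m h_ : Int) {z x y : Int} (hz0 : 0 ≤ z) (hx0 : 0 ≤ x) (hy0 : 0 ≤ y)
    (hzh : z < h_) (hxn : x < n) (hym : y < m) :
    pvV3 (List.replicate h_.toNat (List.replicate n.toNat (List.replicate m.toNat false)))
      z x y = false := by
  rw [pvV3_eq _ hz0 hx0 hy0]
  unfold pv3get
  rw [List.getD_replicate _ (by omega), List.getD_replicate _ (by omega),
    List.getD_replicate _ (by omega)]

-- the initial invariant
theorem pvInv0 (graph : List (List (List Int))) (n m h_ : Int) :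
    pvInv n m h_ (List.replicate h_.toNat (List.replicate n.toNat
      (List.replicate m.toNat false))) graph (pvZeros0 graph n m h_) := by
  refine ⟨pvVD0 n m h_, pvZeros0_nodup graph n m h_, ?_⟩
  intro t
  rw [pvZeros0_mem]
  constructor
  · rintro ⟨hinb, hv⟩
    obtain ⟨hx0, hxn, hy0, hym, hz0, hzh⟩ := id hinb
    exact ⟨hinb, pvV30 n m h_ hz0 hx0 hy0 hzh hxn hym, hv⟩
  · rintro ⟨hinb, _, hv⟩
    exact ⟨hinb, hv⟩


-- ===== VERDICT (by name: the statement is the Claim_ definition above) =====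
theorem BFS_spec : Claim_equal_BFS := by
  intro graph n m h_ hdom hpre
  show BFS graph n m h_ = BFS_alt graph n m h_
  simp only [BFS, BFS_alt]
  rw [pvInit_split graph n m h_]
  simp only
  rw [pvBLoop_eq, pvQ0_eq graph n m h_]
  have happ : (pvFront0 graph n m h_).map (pvTag 0) =
      (pvFront0 graph n m h_).map (pvTag 0) ++ ([] : List PvCell).map (pvTag (0 + 1)) := by simp
  rw [happ]
  have hfuel : (pvFront0 graph n m h_).length + ([] : List PvCell).length +
      (pvZeros0 graph n m h_).length ≤
      ((pvFront0 graph n m h_).map (pvTag 0) ++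
        ([] : List PvCell).map (pvTag (0 + 1))).length +
        h_.toNat * n.toNat * m.toNat + 1 := by
    have hz := pvZeros0_len graph n m h_
    simp only [List.length_append, List.length_map, List.length_nil]
    rw [Nat.mul_assoc]
    omega
  rw [pvALoop_eq n m h_ _ _ _ (pvZeros0 graph n m h_) (pvFront0 graph n m h_) [] 0 0
    (pvInv0 graph n m h_) hfuel]
  by_cases hF : pvFront0 graph n m h_ = []
  · rw [if_pos ⟨hF, rfl⟩, hF, pvM_nil]
    omega
  · rw [if_neg (fun hc => hF hc.1)]
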